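-- pv_equiv track=rewrite | github.com/Junyeong9965/3DCTS | scripts_openroad/buffer_sizing_lp.py | _dedup_by_strength
-- ===== SOURCE A (Python) =====
-- def _dedup_by_strength(entries):
--     by_strength = {}
--     for strength, name in entries:
--         if strength not in by_strength:
--             by_strength[strength] = name
--         else:
--             existing = by_strength[strength]
--             existing_is_f = 'f_' in existing or existing.split('_')[0].endswith('f')
--             new_is_f = 'f_' in name or name.split('_')[0].endswith('f')
--             if existing_is_f and not new_is_f:
--                 by_strength[strength] = name
--     return sorted(by_strength.items())
-- ===== SOURCE B (Python) =====
-- def _is_f(name):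
--     return 'f_' in name or name.split('_')[0].endswith('f')
--
--
-- def _dedup_by_strength(entries):
--     groups = {}
--     for strength, name in entries:
--         groups.setdefault(strength, []).append(name)
--     return sorted(
--         (strength, next((n for n in names if not _is_f(n)), names[0]))
--         for strength, names in groups.items()
--     )
-- ===== Notes on version B (the rewrite author's own statement) =====
-- stated objective: simpler
-- what changed: Replaces A's running conditional best-name update inside the dict with a two-pass collect-then-select structure: first group names per strength with setdefault/append, then pick the first non-f name (else the first name) per strength.
import Mathlib
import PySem

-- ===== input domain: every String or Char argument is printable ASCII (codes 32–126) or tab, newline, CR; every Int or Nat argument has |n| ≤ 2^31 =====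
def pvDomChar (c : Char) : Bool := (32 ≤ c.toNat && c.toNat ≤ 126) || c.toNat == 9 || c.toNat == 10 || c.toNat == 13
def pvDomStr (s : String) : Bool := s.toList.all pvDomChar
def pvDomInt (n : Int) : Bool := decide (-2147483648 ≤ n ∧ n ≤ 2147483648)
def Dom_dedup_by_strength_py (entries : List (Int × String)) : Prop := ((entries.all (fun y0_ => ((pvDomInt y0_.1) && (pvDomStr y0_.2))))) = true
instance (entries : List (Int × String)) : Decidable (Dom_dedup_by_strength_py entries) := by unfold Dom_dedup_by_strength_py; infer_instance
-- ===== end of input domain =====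

-- B replaces A's running conditional best-name update with a collect-then-select two-pass
-- structure (group names per strength, then pick the first non-f name, else the first); simpler.

-- shared predicate, the exact expression both Pythons spell out:
-- 'f_' in name or name.split('_')[0].endswith('f')   (split('_') is never empty, so [0] = headD [])
def pvIsF (name : String) : Bool :=
  PySem.Str.isIn "f_" name ||
    PySem.Chars.endswith ((PySem.Chars.splitOn name.toList ['_']).headD []) ['f']

-- ===== PORT A =====
-- one iteration of A's loop (strength = p.1, name = p.2); getD is exact: the key is present in the else branch
def pvAStep (d : PySem.Dict Int String) (p : Int × String) : PySem.Dict Int String :=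
  if d.contains p.1 = false then d.insert p.1 p.2
  else
    let existing := d.getD p.1 ""
    if pvIsF existing && !pvIsF p.2 then d.insert p.1 p.2 else d

def dedup_by_strength_py (entries : List (Int × String)) : List (Int × String) :=
  PySem.List.sorted2 ((entries.foldl pvAStep PySem.Dict.empty).items) (·.1) (·.2) false

-- ===== PORT B =====
-- groups.setdefault(strength, []).append(name) ≡ groups[strength] = groups.get(strength, []) + [name]
def pvBStep (d : PySem.Dict Int (List String)) (p : Int × String) : PySem.Dict Int (List String) :=
  d.modify p.1 [] (· ++ [p.2])

-- next((n for n in names if not is_f(n)), names[0])   (names is never empty, so [0] = headD "")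
def pvSel (names : List String) : String :=
  (names.filter (fun n => !pvIsF n)).headD (names.headD "")

def dedup_by_strength_py_alt (entries : List (Int × String)) : List (Int × String) :=
  PySem.List.sorted2
    (((entries.foldl pvBStep PySem.Dict.empty).items).map (fun p => (p.1, pvSel p.2)))
    (·.1) (·.2) false

-- ===== PRECONDITION & SPEC =====
def Spec_dedup_by_strength_py (entries : List (Int × String)) (out : List (Int × String)) : Prop := out = dedup_by_strength_py_alt entries
instance (entries : List (Int × String)) (out : List (Int × String)) : Decidable (Spec_dedup_by_strength_py entries out) := by unfold Spec_dedup_by_strength_py; infer_instance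

-- ===== CLAIM (what is proved, stated in full; the proofs are below) =====
def Claim_equal_dedup_by_strength_py : Prop := ∀ (entries : List (Int × String)), Dom_dedup_by_strength_py entries → Spec_dedup_by_strength_py entries (dedup_by_strength_py entries)

-- ===== LEMMAS AND PROOFS =====

theorem pvSel_singleton (n : String) : pvSel [n] = n := by
  unfold pvSel; cases h : pvIsF n <;> simp [List.filter, h]

theorem pvSel_append (L : List String) (hL : L ≠ []) (n : String) :
    pvSel (L ++ [n]) = if pvIsF (pvSel L) && !pvIsF n then n else pvSel L := by
  obtain ⟨h, t, rfl⟩ := List.exists_cons_of_ne_nil hL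
  unfold pvSel
  rw [List.filter_append]
  cases hf : (h :: t).filter (fun m => !pvIsF m) with
  | cons a t' =>
    have ha : pvIsF a = false := by
      have := List.of_mem_filter (p := fun m => !pvIsF m) (a := a)
        (by rw [hf]; exact List.mem_cons_self ..)
      simpa using this
    simp [ha]
  | nil =>
    have hh : pvIsF h = true := by
      by_contra hc
      have hmem : h ∈ (h :: t).filter (fun m => !pvIsF m) :=
        List.mem_filter.2 ⟨List.mem_cons_self .., by simp_all⟩
      rw [hf] at hmem; exact absurd hmem (List.not_mem_nil)
    cases hn : pvIsF n <;> simp [List.filter, hn, hh]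

theorem pv_keys_eq (dA : PySem.Dict Int String) (dB : PySem.Dict Int (List String))
    (hmap : dA.items = dB.items.map (fun p => (p.1, pvSel p.2))) : dA.keys = dB.keys := by
  show dA.items.map (·.1) = dB.items.map (·.1)
  rw [hmap, List.map_map]; rfl

theorem pv_item_unique (dB : PySem.Dict Int (List String)) (hnd : dB.keys.Nodup)
    {s : Int} {L : List String} (hL : (s, L) ∈ dB.items)
    {q : Int × List String} (hq : q ∈ dB.items) (hqs : q.1 = s) : q = (s, L) := by
  have h1 : dB.get? q.1 = some q.2 := PySem.Dict.get?_of_mem_items dB (by simpa using hq) hnd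
  have h2 : dB.get? s = some L := PySem.Dict.get?_of_mem_items dB hL hnd
  rw [hqs, h2] at h1
  exact Prod.ext hqs (by simpa using h1.symm)

theorem pv_fold_items : ∀ (l : List (Int × String)) (dA : PySem.Dict Int String)
    (dB : PySem.Dict Int (List String)),
    dB.keys.Nodup → (∀ p ∈ dB.items, p.2 ≠ []) →
    dA.items = dB.items.map (fun p => (p.1, pvSel p.2)) →
    (l.foldl pvAStep dA).items = (l.foldl pvBStep dB).items.map (fun p => (p.1, pvSel p.2))
  | [], _, _, _, _, hmap => hmap
  | (s, n) :: l, dA, dB, hnd, hne, hmap => by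
    simp only [List.foldl_cons]
    have hkeys : dA.keys = dB.keys := pv_keys_eq dA dB hmap
    have hcont : dA.contains s = dB.contains s := by
      rw [PySem.Dict.contains_eq_decide_mem_keys, PySem.Dict.contains_eq_decide_mem_keys, hkeys]
    have hmodify : pvBStep dB (s, n) = dB.insert s (dB.getD s [] ++ [n]) := rfl
    cases hc : dB.contains s with
    | false =>
      have hAstep : pvAStep dA (s, n) = dA.insert s n := by
        unfold pvAStep; rw [hcont]; simp [hc]
      have hBstep : pvBStep dB (s, n) = dB.insert s [n] := by
        rw [hmodify, PySem.Dict.getD_of_not_contains dB [] hc]; rfl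
      rw [hAstep, hBstep]
      apply pv_fold_items l
      · exact PySem.Dict.nodup_keys_insert _ _ _ hnd
      · intro p hp
        rw [PySem.Dict.items_insert_of_not_contains dB [n] hc] at hp
        rcases List.mem_append.1 hp with h | h
        · exact hne p h
        · simp only [List.mem_singleton] at h; subst h; simp
      · rw [PySem.Dict.items_insert_of_not_contains dB [n] hc,
            PySem.Dict.items_insert_of_not_contains dA n (by rw [hcont]; exact hc)]
        simp [hmap, pvSel_singleton]
    | true =>
      obtain ⟨L, hLget⟩ : ∃ L, dB.get? s = some L := by
        have := PySem.Dict.contains_eq_isSome_get? (d := dB) (k := s)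
        rw [hc] at this
        exact Option.isSome_iff_exists.1 this.symm
      have hLmem : (s, L) ∈ dB.items := PySem.Dict.mem_items_of_get?_eq_some dB hLget
      have hLne : L ≠ [] := hne _ hLmem
      have hgetD : dB.getD s [] = L := PySem.Dict.getD_of_mem_items dB hLmem hnd []
      have hndA : dA.keys.Nodup := hkeys ▸ hnd
      have hselmem : (s, pvSel L) ∈ dA.items := by
        rw [hmap]
        exact List.mem_map_of_mem hLmem
      have hex : dA.getD s "" = pvSel L := PySem.Dict.getD_of_mem_items dA hselmem hndA ""
      have hBstep : pvBStep dB (s, n) = dB.insert s (L ++ [n]) := by rw [hmodify, hgetD]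
      have hBitems : (pvBStep dB (s, n)).items
          = dB.items.map (fun q => if q.1 == s then (s, L ++ [n]) else q) := by
        rw [hBstep]; exact PySem.Dict.items_insert_of_contains dB _ hc
      have hBkeys : (pvBStep dB (s, n)).keys = dB.keys := by
        rw [hBstep]; exact PySem.Dict.keys_insert_of_contains dB _ hc
      have hAstep : pvAStep dA (s, n)
          = if pvIsF (pvSel L) && !pvIsF n then dA.insert s n else dA := by
        unfold pvAStep; rw [hcont]; simp [hc, hex]
      apply pv_fold_items l
      · rw [hBkeys]; exact hnd
      · intro p hp
        rw [hBitems] at hp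
        rcases List.mem_map.1 hp with ⟨q, hq, hpq⟩
        by_cases hqs : q.1 = s
        · rw [if_pos (by exact beq_iff_eq.2 hqs)] at hpq; subst hpq; simp
        · rw [if_neg (by exact (bne_iff_ne ..).1 (by simpa using hqs))] at hpq
          subst hpq; exact hne q hq
      · rw [hBitems, List.map_map, hAstep]
        cases hcv : (pvIsF (pvSel L) && !pvIsF n) with
        | true =>
          simp only [if_true]
          rw [PySem.Dict.items_insert_of_contains dA n (by rw [hcont]; exact hc), hmap,
            List.map_map]
          apply List.map_congr_left
          intro q hq
          by_cases hqs : q.1 = s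
          · have hqL : q = (s, L) := pv_item_unique dB hnd hLmem hq hqs
            subst hqL
            simp [Function.comp, pvSel_append L hLne n, hcv]
          · simp [Function.comp, hqs]
        | false =>
          rw [if_neg (by simp), hmap]
          apply List.map_congr_left
          intro q hq
          by_cases hqs : q.1 = s
          · have hqL : q = (s, L) := pv_item_unique dB hnd hLmem hq hqs
            subst hqL
            simp [Function.comp, pvSel_append L hLne n, hcv]
          · simp [Function.comp, hqs]

theorem pv_items_eq (entries : List (Int × String)) :
    (entries.foldl pvAStep PySem.Dict.empty).items
      = (entries.foldl pvBStep PySem.Dict.empty).items.map (fun p => (p.1, pvSel p.2)) := by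
  apply pv_fold_items entries PySem.Dict.empty PySem.Dict.empty
  · exact PySem.Dict.nodup_keys_empty
  · intro p hp; simp [PySem.Dict.empty] at hp
  · rfl

-- ===== VERDICT (by name: the statement is the Claim_ definition above) =====
theorem dedup_by_strength_py_spec : Claim_equal_dedup_by_strength_py := by
  intro entries _
  unfold Spec_dedup_by_strength_py dedup_by_strength_py dedup_by_strength_py_alt
  rw [pv_items_eq]
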